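-- pv_equiv track=rewrite | github.com/AnaPaulaSPin/Calculadora | Versão3/calculadora_v3.py | validarSinal
-- ===== SOURCE A (Python) =====
-- def validarSinal(operacao):
--    i = 0
--    sinais = '+-/*^%'
--    # encontrar o sinal:
--    while i < len(operacao):
--       if operacao[i] in sinais:
--          return i
--       else:
--          i = i+1
--
--    return -1
-- ===== SOURCE B (Python) =====
-- def validarSinal(operacao):
--     candidates = [p for p in (operacao.find(s) for s in '+-/*^%') if p >= 0]
--     return min(candidates) if candidates else -1
-- ===== Notes on version B (the rewrite author's own statement) =====
-- stated objective: alternative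
-- what changed: Replaces the index-based character-by-character while loop with one str.find per operator combined by a minimum (no-match stays -1).
import Mathlib
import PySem

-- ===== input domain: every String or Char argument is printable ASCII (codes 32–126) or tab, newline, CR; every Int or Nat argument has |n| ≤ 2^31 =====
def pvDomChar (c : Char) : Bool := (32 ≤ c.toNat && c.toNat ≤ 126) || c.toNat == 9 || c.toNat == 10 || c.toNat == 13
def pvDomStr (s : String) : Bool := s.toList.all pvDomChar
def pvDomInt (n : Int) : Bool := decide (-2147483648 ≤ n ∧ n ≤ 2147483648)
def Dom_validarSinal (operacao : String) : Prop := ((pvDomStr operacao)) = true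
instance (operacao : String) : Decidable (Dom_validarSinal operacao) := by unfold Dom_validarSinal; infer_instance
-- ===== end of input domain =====

-- B replaces A's character-by-character index scan with one str.find per operator combined by a minimum (alternative decomposition, same cost).
-- ===== PORT A =====
-- while loop ported as structural recursion over the remaining characters, carrying the index i;
-- `operacao[i] in sinais` is PySem.Chars.isIn on the single character (exact Python membership).
def validarSinalGo (sinais : List Char) (cs : List Char) (i : Int) : Int :=
  match cs with
  | [] => -1
  | c :: t => if PySem.Chars.isIn [c] sinais then i else validarSinalGo sinais t (i + 1)

def validarSinal (operacao : String) : Int :=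
  validarSinalGo "+-/*^%".toList operacao.toList 0

-- ===== PORT B =====
def validarSinal_alt (operacao : String) : Int :=
  let candidates :=
    ((("+-/*^%".toList).map (fun s => PySem.Str.find operacao (String.ofList [s]))).filter
      (fun p => 0 ≤ p))
  match candidates with
  | [] => -1
  | x :: t => t.foldl min x

-- ===== PRECONDITION & SPEC =====
def Spec_validarSinal (operacao : String) (out : Int) : Prop := out = validarSinal_alt operacao
instance (operacao : String) (out : Int) : Decidable (Spec_validarSinal operacao out) := by unfold Spec_validarSinal; infer_instance

-- ===== CLAIM (what is proved, stated in full; the proofs are below) =====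
def Claim_equal_validarSinal : Prop := ∀ (operacao : String), Dom_validarSinal operacao → Spec_validarSinal operacao (validarSinal operacao)

-- ===== LEMMAS AND PROOFS =====

-- `[c] <+: m` means m starts with c
theorem pv_singleton_prefix_iff (c : Char) (m : List Char) : [c] <+: m ↔ m.head? = some c := by
  cases m with
  | nil => simp
  | cons a t => simp [List.cons_prefix_cons]; exact eq_comm

-- `[c] <:+: l` means c ∈ l
theorem pv_singleton_infix_iff (c : Char) (l : List Char) : [c] <:+: l ↔ c ∈ l := by
  constructor
  · intro h; exact h.mem (by simp)
  · intro h
    obtain ⟨s, t, rfl⟩ := List.append_of_mem h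
    exact ⟨s, t, by simp⟩

-- single-char membership test = list contains
theorem pv_isIn_singleton (c : Char) (l : List Char) :
    PySem.Chars.isIn [c] l = l.contains c := by
  by_cases h : c ∈ l
  · have := (PySem.Chars.isIn_iff_infix [c] l).mpr ((pv_singleton_infix_iff c l).mpr h)
    simp [this, h]
  · have := (PySem.Chars.isIn_eq_false_iff [c] l).mpr
      (fun hc => h ((pv_singleton_infix_iff c l).mp hc))
    simp [this, h]

-- characterization of A's loop
theorem pv_goA_eq (sinais : List Char) (l : List Char) (i : Int) :
    validarSinalGo sinais l i =
      match l.findIdx? (fun c => sinais.contains c) with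
      | some j => i + (j : Int)
      | none => -1 := by
  induction l generalizing i with
  | nil => simp [validarSinalGo]
  | cons c t ih =>
    rw [validarSinalGo, pv_isIn_singleton, List.findIdx?_cons]
    by_cases h : c ∈ sinais
    · simp [h]
    · have hcf : sinais.contains c = false := by simp [List.contains_eq_mem, h]
      rw [hcf]
      simp only [Bool.false_eq_true, if_false, ih]
      cases ht : t.findIdx? (fun c => sinais.contains c) with
      | none => rfl
      | some j =>
        simp only [Option.map_some]
        push_cast
        ring

-- prefix of a drop ↔ character at that position
theorem pv_prefix_drop_iff (c : Char) (l : List Char) (k : Nat) :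
    [c] <+: l.drop k ↔ l[k]? = some c := by
  rw [pv_singleton_prefix_iff, List.head?_drop]

-- a nonnegative single-char find points at an occurrence
theorem pv_find_occ (l : List Char) (c : Char) (h : 0 ≤ PySem.Chars.find l [c]) :
    l[(PySem.Chars.find l [c]).toNat]? = some c := by
  have hs := PySem.Chars.find_spec (s := l) (sub := [c]) h
  exact (pv_prefix_drop_iff c l _).mp hs.1

-- find = j when c occurs at j and at no earlier index
theorem pv_find_eq_of_first (l : List Char) (c : Char) (j : Nat)
    (hj : l[j]? = some c) (hmin : ∀ k < j, l[k]? ≠ some c) :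
    PySem.Chars.find l [c] = (j : Int) := by
  obtain ⟨hjlt, hgetj⟩ := List.getElem?_eq_some_iff.mp hj
  have hmem : c ∈ l := hgetj ▸ List.getElem_mem hjlt
  have hpos : 0 ≤ PySem.Chars.find l [c] := by
    rw [PySem.Chars.find_nonneg_iff]
    exact (pv_singleton_infix_iff c l).mpr hmem
  have hs := PySem.Chars.find_spec (s := l) (sub := [c]) hpos
  have hocc := pv_find_occ l c hpos
  rcases lt_trichotomy (PySem.Chars.find l [c]).toNat j with hlt | heq | hgt
  · exact absurd hocc (hmin _ hlt)
  · omega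
  · exact absurd ((pv_prefix_drop_iff c l j).mpr hj) (hs.2 j hgt)

-- fold of min over a list containing j with all elements ≥ j
theorem pv_foldl_min_eq (t : List Int) (x j : Int) (hmem : j = x ∨ j ∈ t)
    (hx : j ≤ x) (ht : ∀ p ∈ t, j ≤ p) : t.foldl min x = j := by
  induction t generalizing x with
  | nil =>
    have := hmem.resolve_right (by simp)
    simp [this]
  | cons p t ih =>
    simp only [List.foldl_cons]
    have hjp : j ≤ p := ht p (by simp)
    have ht' : ∀ q ∈ t, j ≤ q := fun q hq => ht q (List.mem_cons_of_mem _ hq)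
    rcases hmem with h | h
    · exact ih _ (Or.inl (by omega)) (by omega) ht'
    · rcases List.mem_cons.mp h with h | h
      · exact ih _ (Or.inl (by omega)) (by omega) ht'
      · exact ih _ (Or.inr h) (by omega) ht'

-- B computes the same match expression as A's loop (at i = 0)
theorem pv_alt_eq (operacao : String) :
    validarSinal_alt operacao =
      match (operacao.toList).findIdx? (fun c => ("+-/*^%".toList).contains c) with
      | some j => (j : Int)
      | none => -1 := by
  unfold validarSinal_alt
  have hfind : ∀ c : Char, PySem.Str.find operacao (String.ofList [c]) =
      PySem.Chars.find operacao.toList [c] := by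
    intro c
    rw [PySem.Str.find_eq, String.toList_ofList]
  set l := operacao.toList with hl
  set sinais := "+-/*^%".toList with hsin
  cases hidx : l.findIdx? (fun c => sinais.contains c) with
  | none =>
    have hnone : ∀ c ∈ l, sinais.contains c = false :=
      fun c hc => List.findIdx?_eq_none_iff.mp hidx c hc
    have hempty : (sinais.map (fun c => PySem.Str.find operacao (String.ofList [c]))).filter
        (fun p => decide (0 ≤ p)) = [] := by
      rw [List.filter_eq_nil_iff]
      intro p hp
      obtain ⟨c, hc, rfl⟩ := List.mem_map.mp hp
      rw [hfind]
      have hcl : c ∉ l := by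
        intro hcl
        have := hnone c hcl
        simp [List.contains_eq_mem] at this
        exact this hc
      have := (PySem.Chars.find_eq_neg_one_iff l [c]).mpr
        (fun hi => hcl ((pv_singleton_infix_iff c l).mp hi))
      simp [this]
    simp only [hempty]
  | some j =>
    obtain ⟨hjlt, hpj, hmin⟩ := List.findIdx?_eq_some_iff_getElem.mp hidx
    have hc0mem : l[j] ∈ sinais := by simpa [List.contains_eq_mem] using hpj
    have hfj : PySem.Chars.find l [l[j]] = (j : Int) := by
      apply pv_find_eq_of_first l l[j] j (List.getElem?_eq_getElem hjlt)
      intro k hk hkc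
      have hklt : k < l.length := by omega
      have hkf : sinais.contains (l[k]'hklt) = false := by
        have := hmin k hk
        simpa using this
      rw [List.getElem?_eq_getElem hklt] at hkc
      have hck : l[k] = l[j] := Option.some.inj hkc
      rw [hck] at hkf
      simp [List.contains_eq_mem] at hkf
      exact hkf hc0mem
    have hjin : (j : Int) ∈ (sinais.map (fun c => PySem.Str.find operacao (String.ofList [c]))).filter
        (fun p => decide (0 ≤ p)) := by
      apply List.mem_filter.mpr
      refine ⟨List.mem_map.mpr ⟨l[j], hc0mem, ?_⟩, by simp⟩
      rw [hfind, hfj]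
    have hge : ∀ p ∈ (sinais.map (fun c => PySem.Str.find operacao (String.ofList [c]))).filter
        (fun p => decide (0 ≤ p)), (j : Int) ≤ p := by
      intro p hp
      obtain ⟨hpm, hppos⟩ := List.mem_filter.mp hp
      obtain ⟨c, hc, rfl⟩ := List.mem_map.mp hpm
      rw [hfind] at hppos ⊢
      have hpos : 0 ≤ PySem.Chars.find l [c] := by simpa using hppos
      have hocc := pv_find_occ l c hpos
      by_contra hltj
      have hlt : (PySem.Chars.find l [c]).toNat < j := by omega
      obtain ⟨hklt, hck⟩ := List.getElem?_eq_some_iff.mp hocc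
      have hkf := hmin _ hlt
      rw [hck] at hkf
      simp [List.contains_eq_mem] at hkf
      exact hkf hc
    cases hcl : (sinais.map (fun c => PySem.Str.find operacao (String.ofList [c]))).filter
        (fun p => decide (0 ≤ p)) with
    | nil => rw [hcl] at hjin; exact absurd hjin (by simp)
    | cons x t =>
      rw [hcl] at hjin hge
      exact pv_foldl_min_eq t x (j : Int)
        (by rcases List.mem_cons.mp hjin with h | h
            · exact Or.inl h
            · exact Or.inr h)
        (hge x (by simp)) (fun p hp => hge p (List.mem_cons_of_mem _ hp))

-- ===== VERDICT (by name: the statement is the Claim_ definition above) =====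
theorem validarSinal_spec : Claim_equal_validarSinal := by
  intro operacao _
  unfold Spec_validarSinal validarSinal
  rw [pv_goA_eq, pv_alt_eq]
  cases (operacao.toList).findIdx? (fun c => ("+-/*^%".toList).contains c) with
  | none => rfl
  | some j => simp
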